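-- pv_equiv track=rewrite | github.com/MaibornWolff/TreeSitterExcavationSite | src/test/resources/contract/python_sample.py | calculate
-- ===== SOURCE A (Python) =====
-- def calculate(a: int, b: int, c: int, d: int, e: int) -> int:
--     if a < 0 or b < 0:
--         return 0
--     total = 0
--     for i in range(c):
--         total += a + b
--     while d > 0:
--         total += d
--         d -= 1
--     return total + e
-- ===== SOURCE B (Python) =====
-- def calculate(a: int, b: int, c: int, d: int, e: int) -> int:
--     if a < 0 or b < 0:
--         return 0
--     return (a + b) * max(c, 0) + max(d, 0) * (max(d, 0) + 1) // 2 + e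
-- ===== Notes on version B (the rewrite author's own statement) =====
-- stated objective: faster
-- what changed: Replaced the c-iteration loop and the d-countdown while-loop with closed-form arithmetic: (a+b)*max(c,0) + max(d,0)*(max(d,0)+1)//2 + e.
import Mathlib
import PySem

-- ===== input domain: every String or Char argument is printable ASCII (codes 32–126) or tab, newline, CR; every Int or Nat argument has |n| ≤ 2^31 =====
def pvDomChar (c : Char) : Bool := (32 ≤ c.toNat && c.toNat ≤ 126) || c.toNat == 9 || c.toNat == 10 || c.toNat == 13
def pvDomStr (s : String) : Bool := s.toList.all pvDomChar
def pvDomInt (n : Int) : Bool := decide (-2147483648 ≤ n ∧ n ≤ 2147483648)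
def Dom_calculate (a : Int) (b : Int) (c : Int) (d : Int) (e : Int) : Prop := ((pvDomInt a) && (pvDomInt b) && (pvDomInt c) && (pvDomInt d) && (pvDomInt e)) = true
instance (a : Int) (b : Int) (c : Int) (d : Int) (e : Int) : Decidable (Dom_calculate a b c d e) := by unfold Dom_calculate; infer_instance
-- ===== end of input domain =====

-- B replaces A's two loops by closed-form arithmetic (objective: faster, O(1) vs O(c+d)).


-- ===== PORT A =====
-- the 'while d > 0: total += d; d -= 1' loop, step for step
def calcWhile (total : Int) (d : Int) : Int :=
  if h : d > 0 then calcWhile (total + d) (d - 1) else total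
termination_by d.toNat
decreasing_by omega

def calculate (a : Int) (b : Int) (c : Int) (d : Int) (e : Int) : Int :=
  if a < 0 ∨ b < 0 then 0
  else
    let total : Int := 0
    let total := (PySem.List.pyRange 0 c 1).foldl (fun t _ => t + (a + b)) total
    let total := calcWhile total d
    total + e

-- ===== PORT B =====
def calculate_alt (a : Int) (b : Int) (c : Int) (d : Int) (e : Int) : Int :=
  if a < 0 ∨ b < 0 then 0
  else (a + b) * max c 0 + PySem.Int.floordiv (max d 0 * (max d 0 + 1)) 2 + e

-- ===== PRECONDITION & SPEC =====
def Spec_calculate (a : Int) (b : Int) (c : Int) (d : Int) (e : Int) (out : Int) : Prop := out = calculate_alt a b c d e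
instance (a : Int) (b : Int) (c : Int) (d : Int) (e : Int) (out : Int) : Decidable (Spec_calculate a b c d e out) := by unfold Spec_calculate; infer_instance

-- ===== CLAIM (what is proved, stated in full; the proofs are below) =====
def Claim_equal_calculate : Prop := ∀ (a : Int) (b : Int) (c : Int) (d : Int) (e : Int), Dom_calculate a b c d e → Spec_calculate a b c d e (calculate a b c d e)

-- ===== LEMMAS AND PROOFS =====
theorem foldl_const_add (x : Int) (l : List Int) (s : Int) :
    l.foldl (fun t _ => t + x) s = s + x * l.length := by
  induction l generalizing s with
  | nil => simp
  | cons h t ih => simp [List.foldl, ih]; ring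

theorem calcWhile_eq (total d : Int) :
    calcWhile total d = total + PySem.Int.floordiv (max d 0 * (max d 0 + 1)) 2 := by
  by_cases h : d > 0
  · rw [calcWhile, dif_pos h, calcWhile_eq (total + d) (d - 1)]
    have h1 : max d 0 = d := by omega
    have h2 : max (d - 1) 0 = d - 1 := by omega
    have e1 : d * (d + 1) = (d - 1) * (d - 1 + 1) + d * 2 := by ring
    rw [h1, h2, e1]
    simp only [PySem.Int.floordiv]
    rw [Int.add_mul_fdiv_right _ _ (by norm_num : (2:Int) ≠ 0)]
    ring
  · rw [calcWhile, dif_neg h]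
    have h1 : max d 0 = 0 := by omega
    simp [h1, PySem.Int.floordiv]
termination_by d.toNat
decreasing_by omega

-- ===== VERDICT (by name: the statement is the Claim_ definition above) =====
theorem calculate_spec : Claim_equal_calculate := by
  intro a b c d e _
  unfold Spec_calculate calculate calculate_alt
  by_cases h : a < 0 ∨ b < 0
  · simp [h]
  · simp only [if_neg h]
    rw [foldl_const_add, calcWhile_eq]
    rw [PySem.List.length_pyRange_one]
    have hc : ((c - 0).toNat : Int) = max c 0 := by omega
    rw [hc]; ring
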